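-- pv_equiv track=rewrite | github.com/antismash/antismash | antismash/common/secmet/features/cds_feature.py | _sanitise_id_value
-- ===== SOURCE A (Python) =====
-- from typing import Any, Dict, List, Optional, Tuple, Type, TypeVar
--
-- def _sanitise_id_value(name: Optional[str]) -> Optional[str]:
--     """ Ensures a name doesn't contain characters that will break external programs"""
--     if name is None:
--         return None
--     name = str(name)
--     illegal_chars = set("!\"#$%&()*+,:; \r\n\t=>?@[]^`'{|}/ ")
--     for char in set(name).intersection(illegal_chars):
--         name = name.replace(char, "_")
--     return name
-- ===== SOURCE B (Python) =====
-- def _sanitise_id_value(name):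
--     """ Ensures a name doesn't contain characters that will break external programs"""
--     if name is None:
--         return None
--     name = str(name)
--     illegal_chars = set("!\"#$%&()*+,:; \r\n\t=>?@[]^`'{|}/ ")
--     parts = []
--     buf = []
--     for char in name:
--         if char in illegal_chars:
--             parts.append("".join(buf))
--             buf = []
--         else:
--             buf.append(char)
--     parts.append("".join(buf))
--     return "_".join(parts)
-- ===== Notes on version B (the rewrite author's own statement) =====
-- stated objective: alternative
-- what changed: Instead of one str.replace pass per illegal character present, B scans the name once, splitting it into maximal runs of legal characters, and rejoins the runs with underscores (split-and-join decomposition).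
import Mathlib
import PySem

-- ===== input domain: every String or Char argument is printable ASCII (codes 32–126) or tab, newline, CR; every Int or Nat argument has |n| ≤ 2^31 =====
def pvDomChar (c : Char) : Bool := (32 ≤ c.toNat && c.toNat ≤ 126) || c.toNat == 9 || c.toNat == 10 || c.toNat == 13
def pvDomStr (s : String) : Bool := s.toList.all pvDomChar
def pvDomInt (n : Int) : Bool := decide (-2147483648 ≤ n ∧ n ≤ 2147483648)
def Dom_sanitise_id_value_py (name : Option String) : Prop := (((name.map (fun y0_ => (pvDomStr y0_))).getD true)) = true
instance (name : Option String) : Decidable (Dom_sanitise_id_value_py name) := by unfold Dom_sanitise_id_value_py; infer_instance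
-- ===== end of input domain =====

-- B replaces A's per-illegal-character str.replace loop by splitting the name at illegal characters and rejoining the pieces with underscores in one pass; same return value, proved equal.


-- ===== PORT A =====
-- illegal_chars = set("!\"#$%&()*+,:; \r\n\t=>?@[]^`'{|}/ ")
def pvIllegalChars : PySem.Set Char :=
  PySem.Set.ofList "!\"#$%&()*+,:; \r\n\t=>?@[]^`'{|}/ ".toList

-- A iterates over a Python set in hash order; the result is order-independent
-- (each pass replaces one distinct character by '_'), so a fold in the Set's list order is exact.
def sanitise_id_value_py (name : Option String) : Option String :=
  match name with
  | none => none
  | some name =>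
    some ((PySem.Set.inter (PySem.Set.ofList name.toList) pvIllegalChars).foldl
      (fun s ch => PySem.Str.replace s (String.ofList [ch]) "_") name)

-- ===== PORT B =====
-- B scans the name once, cutting it into the maximal runs of legal characters
-- (the loop with `buf`/`parts` in Source B), then rejoins the runs with '_' ("_".join).
def pvIllegalB : PySem.Set Char :=
  PySem.Set.ofList "!\"#$%&()*+,:; \r\n\t=>?@[]^`'{|}/ ".toList

def pvSplitGo : List Char → List Char → List (List Char)
  | [], buf => [buf.reverse]
  | c :: rest, buf =>
    if PySem.Set.contains pvIllegalB c then buf.reverse :: pvSplitGo rest []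
    else pvSplitGo rest (c :: buf)

def sanitise_id_value_py_alt (name : Option String) : Option String :=
  match name with
  | none => none
  | some name =>
    some (String.ofList (List.intercalate ['_'] (pvSplitGo name.toList [])))

-- ===== PRECONDITION & SPEC =====
def Spec_sanitise_id_value_py (name : Option String) (out : Option String) : Prop := out = sanitise_id_value_py_alt name
instance (name : Option String) (out : Option String) : Decidable (Spec_sanitise_id_value_py name out) := by unfold Spec_sanitise_id_value_py; infer_instance

-- ===== CLAIM (what is proved, stated in full; the proofs are below) =====
def Claim_equal_sanitise_id_value_py : Prop := ∀ (name : Option String), Dom_sanitise_id_value_py name → Spec_sanitise_id_value_py name (sanitise_id_value_py name)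

-- ===== LEMMAS AND PROOFS =====

-- replacing the single character c by '_' is a pointwise map
theorem replace_go_single (c : Char) :
    ∀ (l : List Char) (fuel : Nat) (acc : List Char), l.length ≤ fuel →
      PySem.Chars.replace.go [c] ['_'] fuel l acc
        = acc.reverse ++ l.map (fun x => if x = c then '_' else x) := by
  intro l
  induction l with
  | nil =>
    intro fuel acc _
    cases fuel <;> simp [PySem.Chars.replace.go]
  | cons h t ih =>
    intro fuel acc hle
    cases fuel with
    | zero => simp at hle
    | succ fuel =>
      by_cases hc : h = c
      · subst hc
        have : PySem.Chars.replace.go [h] ['_'] (fuel + 1) (h :: t) acc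
            = PySem.Chars.replace.go [h] ['_'] fuel t ('_' :: acc) := by
          simp [PySem.Chars.replace.go, List.isPrefixOf]
        rw [this, ih fuel ('_' :: acc) (by simpa using Nat.lt_succ_iff.mp (by simpa using hle))]
        simp
      · have : PySem.Chars.replace.go [c] ['_'] (fuel + 1) (h :: t) acc
            = PySem.Chars.replace.go [c] ['_'] fuel t (h :: acc) := by
          simp [PySem.Chars.replace.go, List.isPrefixOf, Ne.symm hc]
        rw [this, ih fuel (h :: acc) (by simpa using Nat.lt_succ_iff.mp (by simpa using hle))]
        simp [hc]

theorem replace_single (cs : List Char) (c : Char) :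
    PySem.Chars.replace cs [c] ['_'] = cs.map (fun x => if x = c then '_' else x) := by
  have := replace_go_single c cs cs.length [] (le_refl _)
  simpa [PySem.Chars.replace] using this

-- folding single-character replacements over L = mapping each character through membership in L
theorem fold_replace (L : List Char) (s : String) :
    L.foldl (fun s ch => PySem.Str.replace s (String.ofList [ch]) "_") s
      = String.ofList (s.toList.map (fun x => if x ∈ L then '_' else x)) := by
  induction L generalizing s with
  | nil => simp
  | cons c L ih =>
    have hrep : PySem.Str.replace s (String.ofList [c]) "_"
        = String.ofList (s.toList.map (fun x => if x = c then '_' else x)) := by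
      simp [PySem.Str.replace, replace_single]
    rw [List.foldl_cons, ih, hrep]
    congr 1
    rw [String.toList_ofList, List.map_map]
    apply List.map_congr_left
    intro x _
    by_cases hx : x = c <;> simp [hx]

theorem pvSplitGo_ne_nil (l buf : List Char) : pvSplitGo l buf ≠ [] := by
  induction l generalizing buf with
  | nil => simp [pvSplitGo]
  | cons c rest ih =>
    simp only [pvSplitGo]
    split <;> simp [ih]

theorem intercalate_cons_of_ne_nil (s a : List Char) (L : List (List Char)) (h : L ≠ []) :
    List.intercalate s (a :: L) = a ++ s ++ List.intercalate s L := by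
  cases L with
  | nil => exact absurd rfl h
  | cons b L' => simp [List.intercalate, List.intersperse]

-- rejoining the split runs with '_' = mapping each illegal character to '_'
theorem splitGo_spec (l buf : List Char) :
    List.intercalate ['_'] (pvSplitGo l buf)
      = buf.reverse ++ l.map (fun c => if PySem.Set.contains pvIllegalB c then '_' else c) := by
  induction l generalizing buf with
  | nil => simp [pvSplitGo, List.intercalate]
  | cons c rest ih =>
    simp only [pvSplitGo]
    split
    · rw [intercalate_cons_of_ne_nil _ _ _ (pvSplitGo_ne_nil rest []), ih []]
      simp_all
    · rw [ih (c :: buf)]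
      simp_all

-- ===== VERDICT (by name: the statement is the Claim_ definition above) =====
theorem sanitise_id_value_py_spec : Claim_equal_sanitise_id_value_py := by
  intro name _
  unfold Spec_sanitise_id_value_py
  cases name with
  | none => rfl
  | some s =>
    simp only [sanitise_id_value_py, sanitise_id_value_py_alt, fold_replace, splitGo_spec]
    congr 1
    apply congrArg
    simp only [List.reverse_nil, List.nil_append]
    apply List.map_congr_left
    intro x hx
    have : pvIllegalB = pvIllegalChars := rfl
    rw [this]
    simp [PySem.Set.mem_inter, PySem.Set.mem_ofList, hx, PySem.Set.contains]
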